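-- pv_equiv track=rewrite | github.com/sdhdez/kleis-keyphrase-extraction | src/kleis/resources/dataset.py | largest_keyphrases
-- ===== SOURCE A (Python) =====
-- def largest_keyphrases(keyphrases):
--     """Filter keyphrases choosing the largest"""
--     keyphrases = sorted(keyphrases, key=lambda kp: (kp[1][1][0], -kp[1][1][1]))
--     kps = keyphrases[:1]
--     last = kps[0] if kps else None
--     for i, keyphrase in enumerate(keyphrases[1:]):
--         prev_start, prev_end = last[1][1]
--         start, end = keyphrases[i+1][1][1]
--         if not (prev_start <= start and prev_end >= end):
--             last = keyphrase
--             kps.append(last)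
--     return kps
-- ===== SOURCE B (Python) =====
-- def largest_keyphrases(keyphrases):
--     """Filter keyphrases choosing the largest"""
--     def covered(i, kp):
--         start, end = kp[1][1]
--         for j, other in enumerate(keyphrases):
--             o_start, o_end = other[1][1]
--             if o_start < start and o_end >= end:
--                 return True
--             if o_start == start and (o_end > end or (o_end == end and j < i)):
--                 return True
--         return False
--     kept = [kp for i, kp in enumerate(keyphrases) if not covered(i, kp)]
--     return sorted(kept, key=lambda kp: (kp[1][1][0], -kp[1][1][1]))
-- ===== Notes on version B (the rewrite author's own statement) =====
-- stated objective: alternative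
-- what changed: A sorts first and makes one greedy sweep comparing each keyphrase against the last kept one; B never sweeps: it keeps a keyphrase iff no other keyphrase covers its span (pairwise dominance test, first occurrence wins on identical spans) and only sorts the survivors at the end.
import Mathlib
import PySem

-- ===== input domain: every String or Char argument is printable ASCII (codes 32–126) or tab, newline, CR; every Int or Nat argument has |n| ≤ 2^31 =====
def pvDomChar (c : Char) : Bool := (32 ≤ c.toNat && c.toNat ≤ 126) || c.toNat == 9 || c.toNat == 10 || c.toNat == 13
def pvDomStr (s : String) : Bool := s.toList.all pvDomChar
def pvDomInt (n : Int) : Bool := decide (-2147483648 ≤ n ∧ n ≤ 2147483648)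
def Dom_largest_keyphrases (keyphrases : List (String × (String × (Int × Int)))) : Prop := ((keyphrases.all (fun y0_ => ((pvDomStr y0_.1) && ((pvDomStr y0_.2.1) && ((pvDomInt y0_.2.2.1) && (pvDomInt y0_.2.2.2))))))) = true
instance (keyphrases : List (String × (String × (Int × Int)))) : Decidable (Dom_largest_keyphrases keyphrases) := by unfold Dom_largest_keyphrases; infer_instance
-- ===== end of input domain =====

-- B replaces A's sort-then-greedy-sweep by a pairwise dominance filter (keep a
-- keyphrase iff no other keyphrase covers its span, first wins on identical spans)
-- followed by a sort of the survivors (objective: alternative, same cost).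

abbrev pvKP := String × (String × (Int × Int))

-- ===== PORT A =====
-- Literal transliteration of A: sort by (start, -end), kps = keyphrases[:1],
-- last = kps[0] if kps else None, then for i, keyphrase in enumerate(keyphrases[1:]):
-- read (start, end) from keyphrases[i+1] via pyGet?.  The 'none' branches guard the
-- Option results for totality only (Python never reaches them: last is set whenever
-- the loop runs, and i+1 is always in range).
def largest_keyphrases (keyphrases : List (String × (String × (Int × Int)))) : List (String × (String × (Int × Int))) :=
  let kpsSorted := PySem.List.sorted2 keyphrases (fun kp => kp.2.2.1) (fun kp => -kp.2.2.2)
  let kps := PySem.List.slice kpsSorted none (some 1)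
  let last : Option (String × (String × (Int × Int))) := kps.head?
  let st := (PySem.List.enumerate (PySem.List.slice kpsSorted (some 1) none) 0).foldl
    (fun (st : List (String × (String × (Int × Int))) × Option (String × (String × (Int × Int)))) ik =>
      match st.2 with
      | none => st
      | some la =>
        let prev_start := la.2.2.1
        let prev_end := la.2.2.2
        match PySem.List.pyGet? kpsSorted (ik.1 + 1) with
        | none => st
        | some cur =>
          let start := cur.2.2.1
          let end_ := cur.2.2.2
          if ¬(prev_start ≤ start ∧ prev_end ≥ end_) then (st.1 ++ [ik.2], some ik.2)
          else st)
    (kps, last)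
  st.1

-- ===== PORT B =====
-- Transliteration of Source B's helper 'covered': the for-loop with early 'return True'
-- over enumerate(keyphrases) is List.any over the same enumeration, with the two
-- 'if' conditions disjoined in order.
def pvCovered (keyphrases : List pvKP) (i : Int) (kp : pvKP) : Bool :=
  (PySem.List.enumerate keyphrases 0).any (fun jo =>
    (decide (jo.2.2.2.1 < kp.2.2.1) && decide (jo.2.2.2.2 ≥ kp.2.2.2)) ||
    (decide (jo.2.2.2.1 = kp.2.2.1) &&
      (decide (jo.2.2.2.2 > kp.2.2.2) || (decide (jo.2.2.2.2 = kp.2.2.2) && decide (jo.1 < i)))))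

-- Transliteration of Source B: keep the uncovered keyphrases (comprehension over
-- enumerate = filter + map), then sort only the survivors.
def largest_keyphrases_alt (keyphrases : List (String × (String × (Int × Int)))) : List (String × (String × (Int × Int))) :=
  let kept := ((PySem.List.enumerate keyphrases 0).filter
    (fun ik => !pvCovered keyphrases ik.1 ik.2)).map (·.2)
  PySem.List.sorted2 kept (fun kp => kp.2.2.1) (fun kp => -kp.2.2.2)

-- ===== PRECONDITION & SPEC =====
def Spec_largest_keyphrases (keyphrases : List (String × (String × (Int × Int)))) (out : List (String × (String × (Int × Int)))) : Prop := out = largest_keyphrases_alt keyphrases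
instance (keyphrases : List (String × (String × (Int × Int)))) (out : List (String × (String × (Int × Int)))) : Decidable (Spec_largest_keyphrases keyphrases out) := by unfold Spec_largest_keyphrases; infer_instance

-- ===== CLAIM (what is proved, stated in full; the proofs are below) =====
def Claim_equal_largest_keyphrases : Prop := ∀ (keyphrases : List (String × (String × (Int × Int)))), Dom_largest_keyphrases keyphrases → Spec_largest_keyphrases keyphrases (largest_keyphrases keyphrases)

-- ===== LEMMAS AND PROOFS =====

-- Loop bodies of port A, named for the proofs.
def pvBodyA (s : List pvKP) (st : List pvKP × Option pvKP) (ik : Int × pvKP) : List pvKP × Option pvKP :=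
  match st.2 with
  | none => st
  | some la =>
    match PySem.List.pyGet? s (ik.1 + 1) with
    | none => st
    | some cur =>
      if ¬(la.2.2.1 ≤ cur.2.2.1 ∧ la.2.2.2 ≥ cur.2.2.2) then (st.1 ++ [ik.2], some ik.2)
      else st

def pvBodyA' (st : List pvKP × Option pvKP) (kp : pvKP) : List pvKP × Option pvKP :=
  match st.2 with
  | none => st
  | some la =>
    if ¬(la.2.2.1 ≤ kp.2.2.1 ∧ la.2.2.2 ≥ kp.2.2.2) then (st.1 ++ [kp], some kp)
    else st

-- The running-max greedy body (intermediate form both sides are reduced to).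
def pvBodyB (st : List pvKP × Option Int) (kp : pvKP) : List pvKP × Option Int :=
  match st.2 with
  | none => (st.1 ++ [kp], some kp.2.2.2)
  | some m => if kp.2.2.2 > m then (st.1 ++ [kp], some kp.2.2.2) else st

-- The sort comparators: pvC2 is sorted2's comparator for key (start, -end);
-- pvCI breaks its ties by the enumeration index (a strict total order).
def pvC2 (a b : pvKP) : Bool :=
  decide (a.2.2.1 < b.2.2.1) || (!decide (b.2.2.1 < a.2.2.1) && decide (-a.2.2.2 < -b.2.2.2))

def pvCI (u v : Int × pvKP) : Bool :=
  pvC2 u.2 v.2 || (!pvC2 u.2 v.2 && !pvC2 v.2 u.2 && decide (u.1 < v.1))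

-- Strict order on indexed keyphrases: before in the stable sort.
def pvLtB (u v : Int × pvKP) : Bool :=
  decide (u.2.2.2.1 < v.2.2.2.1) ||
  (decide (u.2.2.2.1 = v.2.2.2.1) &&
    (decide (v.2.2.2.2 < u.2.2.2.2) || (decide (u.2.2.2.2 = v.2.2.2.2) && decide (u.1 < v.1))))

-- Kept test: no element of E strictly before u has end ≥ u's end.
def pvQ (E : List (Int × pvKP)) (u : Int × pvKP) : Bool :=
  !(E.any (fun v => pvLtB v u && decide (u.2.2.2.2 ≤ v.2.2.2.2)))

-- The index-decorated sort of xs.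
def pvT (xs : List pvKP) : List (Int × pvKP) :=
  (PySem.List.enumerate xs 0).foldl (fun acc u => PySem.List.insertBy pvCI u acc) []

theorem pv_ltB_asymm (u v : Int × pvKP) (h1 : pvLtB u v = true) (h2 : pvLtB v u = true) : False := by
  simp only [pvLtB, Bool.or_eq_true, Bool.and_eq_true, decide_eq_true_eq] at h1 h2
  omega

theorem pv_ltB_irrefl (u : Int × pvKP) : pvLtB u u = false := by
  simp only [pvLtB, Bool.or_eq_false_iff, Bool.and_eq_false_iff, decide_eq_false_iff_not]
  omega

theorem pvA_eq_body (keyphrases : List pvKP) :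
    largest_keyphrases keyphrases =
      (let s := PySem.List.sorted2 keyphrases (fun kp => kp.2.2.1) (fun kp => -kp.2.2.2)
       ((PySem.List.enumerate s.tail 0).foldl (pvBodyA s) (s.take 1, (s.take 1).head?)).1) := by
  have hslice : PySem.List.slice
      (PySem.List.sorted2 keyphrases (fun kp => kp.2.2.1) (fun kp => -kp.2.2.2)) none (some 1)
      = (PySem.List.sorted2 keyphrases (fun kp => kp.2.2.1) (fun kp => -kp.2.2.2)).take 1 := by
    have h := PySem.List.slice_to
      (xs := PySem.List.sorted2 keyphrases (fun kp => kp.2.2.1) (fun kp => -kp.2.2.2))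
      (b := 1) (by norm_num)
    simpa using h
  simp only [largest_keyphrases, PySem.List.slice_from_one, hslice]
  rfl

theorem pvB_eq_body (keyphrases : List pvKP) :
    largest_keyphrases_alt keyphrases =
      PySem.List.sorted2
        (((PySem.List.enumerate keyphrases 0).filter
          (fun ik => !pvCovered keyphrases ik.1 ik.2)).map (·.2))
        (fun kp => kp.2.2.1) (fun kp => -kp.2.2.2) := rfl

-- insertBy preserves Pairwise R for a relation compatible with the comparator.
theorem pv_insertBy_pairwise {α : Type} (R : α → α → Prop) (before : α → α → Bool)
    (h1 : ∀ a b, before a b = true → R a b) (h2 : ∀ a b, before a b = false → R b a)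
    (ht : ∀ {a b c}, R a b → R b c → R a c)
    (x : α) (l : List α) (hl : l.Pairwise R) :
    (PySem.List.insertBy before x l).Pairwise R := by
  induction l with
  | nil => simp [PySem.List.insertBy]
  | cons y ys ih =>
    rcases List.pairwise_cons.1 hl with ⟨hy, hys⟩
    cases hb : before x y with
    | true =>
      simp only [PySem.List.insertBy, hb]
      refine List.pairwise_cons.2 ⟨?_, hl⟩
      intro z hz
      rcases List.mem_cons.1 hz with rfl | hz
      · exact h1 _ _ hb
      · exact ht (h1 _ _ hb) (hy _ hz)
    | false =>
      simp only [PySem.List.insertBy, hb]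
      refine List.pairwise_cons.2 ⟨?_, ih hys⟩
      intro z hz
      rcases (PySem.List.mem_insertBy before x z ys).1 hz with rfl | hz
      · exact h2 _ _ hb
      · exact hy _ hz

-- insertBy is a permutation of cons.
theorem pv_insertBy_perm {α : Type} (c : α → α → Bool) (x : α) (l : List α) :
    (PySem.List.insertBy c x l).Perm (x :: l) := by
  induction l with
  | nil => simp [PySem.List.insertBy]
  | cons y ys ih =>
    cases hb : c x y with
    | true => simp [PySem.List.insertBy, hb]
    | false =>
      simp only [PySem.List.insertBy, hb]
      exact (ih.cons y).trans (List.Perm.swap x y ys)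

theorem pv_foldl_insert_perm {α : Type} (c : α → α → Bool) :
    ∀ (l acc : List α), (l.foldl (fun a u => PySem.List.insertBy c u a) acc).Perm (acc ++ l) := by
  intro l
  induction l with
  | nil => intro acc; simp
  | cons h t ih =>
    intro acc
    simp only [List.foldl_cons]
    refine (ih (PySem.List.insertBy c h acc)).trans ?_
    refine (List.Perm.append_right t ((pv_insertBy_perm c h acc))).trans ?_
    simpa using List.perm_middle.symm

theorem pv_t_perm (xs : List pvKP) : (pvT xs).Perm (PySem.List.enumerate xs 0) := by
  simpa using pv_foldl_insert_perm pvCI (PySem.List.enumerate xs 0) []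

theorem pv_enumerate_mem_ge {α : Type} :
    ∀ (l : List α) (n : Int) (u : Int × α), u ∈ PySem.List.enumerate l n → n ≤ u.1 := by
  intro l
  induction l with
  | nil => intro n u h; rw [PySem.List.enumerate_nil] at h; cases h
  | cons x t ih =>
    intro n u h
    rw [PySem.List.enumerate_cons] at h
    rcases List.mem_cons.1 h with rfl | h
    · simp
    · have := ih (n + 1) u h; omega

theorem pv_enumerate_pairwise {α : Type} :
    ∀ (l : List α) (n : Int), (PySem.List.enumerate l n).Pairwise (fun u v => u.1 < v.1) := by
  intro l
  induction l with
  | nil => intro n; rw [PySem.List.enumerate_nil]; exact List.Pairwise.nil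
  | cons x t ih =>
    intro n
    rw [PySem.List.enumerate_cons]
    refine List.pairwise_cons.2 ⟨?_, ih (n + 1)⟩
    intro v hv
    have := pv_enumerate_mem_ge t (n + 1) v hv
    simp only
    omega

-- the ≤-version of the indexed order, for the insertion-sort pairwise lemma
def pvLe (u v : Int × pvKP) : Prop :=
  pvLtB u v = true ∨ (u.2.2.2.1 = v.2.2.2.1 ∧ u.2.2.2.2 = v.2.2.2.2 ∧ u.1 = v.1)

theorem pv_t_pairwise_le (xs : List pvKP) : (pvT xs).Pairwise pvLe := by
  have key : ∀ (l acc : List (Int × pvKP)), acc.Pairwise pvLe →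
      (l.foldl (fun a u => PySem.List.insertBy pvCI u a) acc).Pairwise pvLe := by
    intro l
    induction l with
    | nil => intro acc h; simpa using h
    | cons x t ih =>
      intro acc h
      simp only [List.foldl_cons]
      refine ih _ ?_
      refine pv_insertBy_pairwise pvLe pvCI ?_ ?_ ?_ x acc h
      · intro a b hb
        simp only [pvCI, pvC2, pvLtB, pvLe, Bool.or_eq_true, Bool.and_eq_true,
          Bool.not_eq_true', Bool.not_eq_false', Bool.or_eq_false_iff, Bool.and_eq_false_iff,
          decide_eq_true_eq, decide_eq_false_iff_not] at hb ⊢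
        omega
      · intro a b hb
        simp only [pvCI, pvC2, pvLtB, pvLe, Bool.or_eq_false_iff, Bool.and_eq_false_iff,
          Bool.not_eq_true', Bool.not_eq_false', Bool.or_eq_true, Bool.and_eq_true,
          decide_eq_true_eq, decide_eq_false_iff_not] at hb ⊢
        omega
      · intro a b c hab hbc
        simp only [pvLtB, pvLe, Bool.or_eq_true, Bool.and_eq_true, decide_eq_true_eq] at hab hbc ⊢
        omega
  simpa [pvT] using key (PySem.List.enumerate xs 0) [] (by simp)

theorem pv_t_pairwise_lt (xs : List pvKP) : (pvT xs).Pairwise (fun u v => pvLtB u v = true) := by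
  have hne : (pvT xs).Pairwise (fun u v => u.1 ≠ v.1) := by
    have hsym : ∀ {u v : Int × pvKP}, u.1 ≠ v.1 → v.1 ≠ u.1 := fun h he => h he.symm
    refine ((pv_t_perm xs).pairwise_iff @hsym).2 ?_
    exact (pv_enumerate_pairwise xs 0).imp (by intro a b h; omega)
  have := (pv_t_pairwise_le xs).and hne
  refine this.imp ?_
  rintro u v ⟨hle, hne⟩
  rcases hle with h | h
  · exact h
  · exact absurd h.2.2 hne

-- Stability: projecting the index-decorated sort gives exactly sorted2.
theorem pv_map_insertBy (n : Int) (x : pvKP) :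
    ∀ (acc : List (Int × pvKP)), (∀ y ∈ acc, y.1 < n) →
      (PySem.List.insertBy pvCI (n, x) acc).map (·.2) =
        PySem.List.insertBy pvC2 x (acc.map (·.2)) := by
  intro acc
  induction acc with
  | nil => intro _; simp [PySem.List.insertBy]
  | cons y ys ih =>
    intro hb
    have hy : y.1 < n := hb y (by simp)
    have hcomp : pvCI (n, x) y = pvC2 x y.2 := by
      simp only [pvCI]
      have : decide ((n, x).1 < y.1) = false := by simp only; simp; omega
      simp [this]
    cases hc : pvC2 x y.2 with
    | true =>
      simp [PySem.List.insertBy, hcomp, hc]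
    | false =>
      simp only [PySem.List.insertBy, hcomp, hc, Bool.false_eq_true, if_false, List.map_cons]
      rw [ih (fun z hz => hb z (by simp [hz]))]

theorem pv_stab_aux :
    ∀ (l : List pvKP) (n : Int) (acc : List (Int × pvKP)), (∀ y ∈ acc, y.1 < n) →
      ((PySem.List.enumerate l n).foldl (fun a u => PySem.List.insertBy pvCI u a) acc).map (·.2)
        = l.foldl (fun a x => PySem.List.insertBy pvC2 x a) (acc.map (·.2)) := by
  intro l
  induction l with
  | nil => intro n acc _; rw [PySem.List.enumerate_nil]; rfl
  | cons x t ih =>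
    intro n acc hb
    rw [PySem.List.enumerate_cons, List.foldl_cons, List.foldl_cons]
    rw [ih (n + 1) (PySem.List.insertBy pvCI (n, x) acc) ?_]
    · rw [pv_map_insertBy n x acc hb]
    · intro y hy
      rcases (PySem.List.mem_insertBy pvCI (n, x) y acc).1 hy with rfl | hy
      · omega
      · have := hb y hy; omega

theorem pv_s_eq (xs : List pvKP) :
    (pvT xs).map (·.2) = PySem.List.sorted2 xs (fun kp => kp.2.2.1) (fun kp => -kp.2.2.2) := by
  exact pv_stab_aux xs 0 [] (by simp)

-- pvQ over the sorted decoration pvT xs coincides with Source B's 'not covered'.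
theorem pv_q_eq_cov (xs : List pvKP) (u : Int × pvKP) :
    pvQ (pvT xs) u = !pvCovered xs u.1 u.2 := by
  have hmem : ∀ v, v ∈ pvT xs ↔ v ∈ PySem.List.enumerate xs 0 :=
    fun v => (pv_t_perm xs).mem_iff
  have hiff : (∃ v ∈ pvT xs, pvLtB v u = true ∧ u.2.2.2.2 ≤ v.2.2.2.2) ↔
      pvCovered xs u.1 u.2 = true := by
    simp only [pvCovered, List.any_eq_true, pvLtB, Bool.or_eq_true, Bool.and_eq_true,
      decide_eq_true_eq]
    constructor
    · rintro ⟨v, hv, h1, h2⟩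
      exact ⟨v, (hmem v).1 hv, by omega⟩
    · rintro ⟨v, hv, h⟩
      exact ⟨v, (hmem v).2 hv, by omega⟩
  cases hc : pvCovered xs u.1 u.2 with
  | true =>
    rcases hiff.2 hc with ⟨v, hv, h1, h2⟩
    have hany : (pvT xs).any (fun v => pvLtB v u && decide (u.2.2.2.2 ≤ v.2.2.2.2)) = true :=
      List.any_eq_true.2 ⟨v, hv, by simp [h1, h2]⟩
    simp [pvQ, hany]
  | false =>
    have hany : (pvT xs).any (fun v => pvLtB v u && decide (u.2.2.2.2 ≤ v.2.2.2.2)) = false := by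
      by_contra h
      have h2 : (pvT xs).any (fun v => pvLtB v u && decide (u.2.2.2.2 ≤ v.2.2.2.2)) = true := by
        revert h; cases (pvT xs).any (fun v => pvLtB v u && decide (u.2.2.2.2 ≤ v.2.2.2.2)) <;> simp
      rcases List.any_eq_true.1 h2 with ⟨v, hv, hb⟩
      simp only [Bool.and_eq_true, decide_eq_true_eq] at hb
      exact absurd (hiff.1 ⟨v, hv, hb.1, hb.2⟩) (by simp [hc])
    simp [pvQ, hany]

-- The greedy running-max sweep over the decorated sorted list returns
-- exactly the pvQ-kept elements.
theorem pv_greedy (E : List (Int × pvKP)) (hpw : E.Pairwise (fun u v => pvLtB u v = true)) :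
    ∀ (rest pre : List (Int × pvKP)) (m : Option Int), E = pre ++ rest →
      (m = none ↔ pre = []) →
      (∀ mv, m = some mv → (∀ v ∈ pre, v.2.2.2.2 ≤ mv) ∧ (∃ v ∈ pre, v.2.2.2.2 = mv)) →
      (rest.foldl (fun st u => pvBodyB st u.2) ((pre.filter (pvQ E)).map (·.2), m)).1
        = (E.filter (pvQ E)).map (·.2) := by
  intro rest
  induction rest with
  | nil =>
    intro pre m hE _ _
    subst hE; simp
  | cons u rs ih =>
    intro pre m hE hnone hmax
    have hEpw := hpw
    rw [hE] at hEpw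
    have hsplit := (List.pairwise_append).1 hEpw
    have hpre_u : ∀ v ∈ pre, pvLtB v u = true := fun v hv => hsplit.2.2 v hv u (by simp)
    have hu_rs : ∀ w ∈ rs, pvLtB u w = true :=
      fun w hw => (List.pairwise_cons.1 hsplit.2.1).1 w hw
    -- whether u is kept
    have hkeepQ : (∀ v ∈ pre, v.2.2.2.2 < u.2.2.2.2) → pvQ E u = true := by
      intro hlt
      simp only [pvQ, Bool.not_eq_true', List.any_eq_false]
      intro v hv
      rw [hE] at hv
      simp only [Bool.and_eq_false_iff, Bool.not_eq_true, decide_eq_false_iff_not]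
      rcases List.mem_append.1 hv with hv | hv
      · right; have := hlt v hv; omega
      · rcases List.mem_cons.1 hv with rfl | hv
        · left; exact pv_ltB_irrefl _
        · left
          cases hvb : pvLtB v u with
          | true => exact absurd hvb (fun h => pv_ltB_asymm u v (hu_rs v hv) h)
          | false => rfl
    rw [List.foldl_cons]
    cases m with
    | none =>
      have hpre : pre = [] := hnone.1 rfl
      subst hpre
      have hq : pvQ E u = true := hkeepQ (by simp)
      have hstep : pvBodyB (([].filter (pvQ E)).map (·.2), none) u.2
          = (([u].filter (pvQ E)).map (·.2), some u.2.2.2.2) := by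
        simp [pvBodyB, hq]
      rw [hstep]
      refine ih [u] (some u.2.2.2.2) (by simpa using hE) (by simp) ?_
      intro mv hmv
      refine ⟨?_, ⟨u, by simp, Option.some_inj.1 hmv⟩⟩
      intro v hv
      rcases List.mem_singleton.1 hv with rfl
      simp at hmv; omega
    | some mv =>
      rcases hmax mv rfl with ⟨hbound, v0, hv0, hv0e⟩
      by_cases hgt : u.2.2.2.2 > mv
      · have hq : pvQ E u = true := by
          refine hkeepQ ?_
          intro v hv; have := hbound v hv; omega
        have hstep : pvBodyB ((pre.filter (pvQ E)).map (·.2), some mv) u.2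
            = (((pre ++ [u]).filter (pvQ E)).map (·.2), some u.2.2.2.2) := by
          simp [pvBodyB, hgt, hq, List.filter_append]
        rw [hstep]
        refine ih (pre ++ [u]) (some u.2.2.2.2) (by simpa using hE) (by simp) ?_
        intro mv' hmv'
        have hmv'' : mv' = u.2.2.2.2 := (Option.some_inj.1 hmv').symm
        subst hmv''
        refine ⟨?_, ⟨u, by simp, rfl⟩⟩
        intro v hv
        rcases List.mem_append.1 hv with hv | hv
        · have := hbound v hv; omega
        · rcases List.mem_singleton.1 hv with rfl; omega
      · -- u is dominated by v0 (end mv ≥ end u, and v0 is before u)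
        have hq : pvQ E u = false := by
          simp only [pvQ, Bool.not_eq_false', List.any_eq_true]
          refine ⟨v0, by rw [hE]; exact List.mem_append.2 (Or.inl hv0), ?_⟩
          simp only [Bool.and_eq_true, decide_eq_true_eq]
          exact ⟨hpre_u v0 hv0, by omega⟩
        have hstep : pvBodyB ((pre.filter (pvQ E)).map (·.2), some mv) u.2
            = (((pre ++ [u]).filter (pvQ E)).map (·.2), some mv) := by
          simp [pvBodyB, hgt, hq, List.filter_append]
        rw [hstep]
        refine ih (pre ++ [u]) (some mv) (by simpa using hE) (by simp) ?_
        intro mv' hmv'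
        have hmv'' : mv' = mv := (Option.some_inj.1 hmv').symm
        subst hmv''
        refine ⟨?_, ⟨v0, List.mem_append.2 (Or.inl hv0), hv0e⟩⟩
        intro v hv
        rcases List.mem_append.1 hv with hv | hv
        · exact hbound v hv
        · rcases List.mem_singleton.1 hv with rfl; omega

-- Reduce A's loop (which re-reads keyphrases[i+1]) to a plain fold over the tail.
theorem pv_enum_fold (h : pvKP) (t : List pvKP) (acc : List pvKP × Option pvKP) :
    (PySem.List.enumerate t 0).foldl (pvBodyA (h :: t)) acc = t.foldl pvBodyA' acc := by
  suffices H : ∀ (pre t : List pvKP) (acc : List pvKP × Option pvKP),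
      (PySem.List.enumerate t (pre.length : Int)).foldl (pvBodyA (h :: (pre ++ t))) acc
        = t.foldl pvBodyA' acc by
    simpa using H [] t acc
  intro pre t
  induction t generalizing pre with
  | nil => intro acc; simp [PySem.List.enumerate_nil]
  | cons x xs ih =>
    intro acc
    rw [PySem.List.enumerate_cons, List.foldl_cons, List.foldl_cons]
    have hx : PySem.List.pyGet? (h :: (pre ++ x :: xs)) ((pre.length : Int) + 1) = some x := by
      have : ((pre.length : Int) + 1) = ((pre.length + 1 : Nat) : Int) := by push_cast; ring
      rw [this, PySem.List.pyGet?_natCast]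
      simp
    have hbody : pvBodyA (h :: (pre ++ x :: xs)) acc ((pre.length : Int), x) = pvBodyA' acc x := by
      unfold pvBodyA pvBodyA'
      cases acc.2 with
      | none => rfl
      | some la => simp [hx]
    rw [hbody]
    have := ih (pre ++ [x]) (pvBodyA' acc x)
    have hlen : (((pre ++ [x]).length : Nat) : Int) = (pre.length : Int) + 1 := by simp
    rw [hlen, List.append_assoc, List.singleton_append] at this
    exact this

-- The sorted2 output is Pairwise-nondecreasing in the first key.
theorem pv_sorted2_pairwise_fst (xs : List pvKP) :
    (PySem.List.sorted2 xs (fun kp => kp.2.2.1) (fun kp => -kp.2.2.2)).Pairwise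
      (fun a b => a.2.2.1 ≤ b.2.2.1) := by
  rw [← pv_s_eq]
  refine List.Pairwise.map (·.2) ?_ (pv_t_pairwise_lt xs)
  intro u v h
  simp only [pvLtB, Bool.or_eq_true, Bool.and_eq_true, decide_eq_true_eq] at h
  simp only
  omega

-- A's containment test against the last kept element equals the running-max sweep
-- on a start-sorted tail whose head start is minimal.
theorem pv_main (t : List pvKP) (kps : List pvKP) (la : pvKP)
    (hs : ∀ z ∈ t, la.2.2.1 ≤ z.2.2.1)
    (hp : t.Pairwise (fun a b => a.2.2.1 ≤ b.2.2.1)) :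
    (t.foldl pvBodyA' (kps, some la)).1 = (t.foldl pvBodyB (kps, some la.2.2.2)).1 := by
  induction t generalizing kps la with
  | nil => rfl
  | cons x xs ih =>
    rcases List.pairwise_cons.1 hp with ⟨hx, hxs⟩
    have hstart : la.2.2.1 ≤ x.2.2.1 := hs x (by simp)
    rw [List.foldl_cons, List.foldl_cons]
    by_cases hc : x.2.2.2 > la.2.2.2
    · have hA : pvBodyA' (kps, some la) x = (kps ++ [x], some x) := by
        unfold pvBodyA'; simp only
        rw [if_pos]; omega
      have hB : pvBodyB (kps, some la.2.2.2) x = (kps ++ [x], some x.2.2.2) := by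
        unfold pvBodyB; simp only
        rw [if_pos hc]
      rw [hA, hB]
      exact ih (kps ++ [x]) x hx hxs
    · have hA : pvBodyA' (kps, some la) x = (kps, some la) := by
        unfold pvBodyA'; simp only
        rw [if_neg]; omega
      have hB : pvBodyB (kps, some la.2.2.2) x = (kps, some la.2.2.2) := by
        unfold pvBodyB; simp only
        rw [if_neg hc]
      rw [hA, hB]
      exact ih kps la (fun z hz => hs z (List.mem_cons_of_mem x hz)) hxs

-- A equals the running-max sweep over the sorted list.
theorem pv_A_eq_sweep (xs : List pvKP) :
    largest_keyphrases xs =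
      ((PySem.List.sorted2 xs (fun kp => kp.2.2.1) (fun kp => -kp.2.2.2)).foldl
        pvBodyB ([], none)).1 := by
  rw [pvA_eq_body]
  set s := PySem.List.sorted2 xs (fun kp => kp.2.2.1) (fun kp => -kp.2.2.2) with hsdef
  have hpair : s.Pairwise (fun a b => a.2.2.1 ≤ b.2.2.1) := pv_sorted2_pairwise_fst xs
  cases hse : s with
  | nil => simp
  | cons h t =>
    rw [hse] at hpair
    rcases List.pairwise_cons.1 hpair with ⟨hh, ht⟩
    simp only [List.tail_cons, List.take_succ_cons, List.take_zero, List.head?_cons]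
    rw [pv_enum_fold h t ([h], some h)]
    rw [List.foldl_cons]
    have hB0 : pvBodyB ([], none) h = ([h], some h.2.2.2) := by unfold pvBodyB; rfl
    rw [hB0]
    exact pv_main t [h] h hh ht

-- comparator congruence under pairwise agreement: the foldl insertion sorts agree
theorem pv_insertBy_congr {α : Type} (c c' : α → α → Bool) (x : α) :
    ∀ (l : List α), (∀ y ∈ l, c x y = c' x y) →
      PySem.List.insertBy c x l = PySem.List.insertBy c' x l := by
  intro l
  induction l with
  | nil => intro _; rfl
  | cons y ys ih =>
    intro hagree
    have hy : c x y = c' x y := hagree y (by simp)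
    simp only [PySem.List.insertBy, ← hy]
    cases c x y with
    | true => rfl
    | false => rw [ih (fun z hz => hagree z (by simp [hz]))]

theorem pv_foldl_insert_congr {α : Type} (c c' : α → α → Bool) :
    ∀ (l acc : List α),
      (∀ x ∈ l, ∀ y ∈ acc, c x y = c' x y) →
      (l.Pairwise (fun a b => c b a = c' b a)) →
      l.foldl (fun a u => PySem.List.insertBy c u a) acc
        = l.foldl (fun a u => PySem.List.insertBy c' u a) acc := by
  intro l
  induction l with
  | nil => intro acc _ _; rfl
  | cons h t ih =>
    intro acc hcross hpw
    rcases List.pairwise_cons.1 hpw with ⟨hh, ht⟩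
    simp only [List.foldl_cons]
    rw [pv_insertBy_congr c c' h acc (hcross h (by simp))]
    refine ih (PySem.List.insertBy c' h acc) ?_ ht
    intro x hx y hy
    rcases (PySem.List.mem_insertBy c' h y acc).1 hy with rfl | hy
    · exact hh x hx
    · exact hcross x (by simp [hx]) y hy

-- ===== VERDICT helper: the final equality =====
theorem pv_ab_eq (xs : List pvKP) : largest_keyphrases xs = largest_keyphrases_alt xs := by
  -- A side: running-max sweep over sorted list = kept elements of the decoration
  have hA : largest_keyphrases xs = ((pvT xs).filter (pvQ (pvT xs))).map (·.2) := by
    rw [pv_A_eq_sweep, ← pv_s_eq, List.foldl_map]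
    have := pv_greedy (pvT xs) (pv_t_pairwise_lt xs) (pvT xs) [] none rfl
      (by simp) (by intro mv h; cases h)
    simpa using this
  -- B side
  rw [hA, pvB_eq_body]
  -- the filtered enumeration is pvQ-filtered
  have hfc : (PySem.List.enumerate xs 0).filter (fun ik => !pvCovered xs ik.1 ik.2)
      = (PySem.List.enumerate xs 0).filter (pvQ (pvT xs)) := by
    refine List.filter_congr ?_
    intro u _
    rw [pv_q_eq_cov xs u]
  rw [hfc]
  set K := ((pvT xs).filter (pvQ (pvT xs))).map (·.2) with hK
  set z := (((PySem.List.enumerate xs 0).filter (pvQ (pvT xs))).map (·.2)) with hz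
  -- K is a rearrangement of z
  have hperm : K.Perm z := ((pv_t_perm xs).filter (pvQ (pvT xs))).map (·.2)
  -- K is strictly increasing in start
  have hKlt : K.Pairwise (fun a b => a.2.2.1 < b.2.2.1) := by
    rw [hK]
    have hpw : ((pvT xs).filter (pvQ (pvT xs))).Pairwise (fun u v => pvLtB u v = true) :=
      (pv_t_pairwise_lt xs).filter (pvQ (pvT xs))
    have hpw2 : ((pvT xs).filter (pvQ (pvT xs))).Pairwise (fun u v => u.2.2.2.1 < v.2.2.2.1) := by
      refine List.Pairwise.imp_of_mem ?_ hpw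
      intro u v hu hv hlt
      have hqv : pvQ (pvT xs) v = true := (List.mem_filter.1 hv).2
      have hut : u ∈ pvT xs := (List.mem_filter.1 hu).1
      -- if starts were equal, u would dominate v, contradicting pvQ v
      by_contra hcon
      simp only [pvLtB, Bool.or_eq_true, Bool.and_eq_true, decide_eq_true_eq] at hlt
      have hstart : u.2.2.2.1 = v.2.2.2.1 := by
        simp only at hcon; omega
      have hdom : pvLtB u v = true ∧ v.2.2.2.2 ≤ u.2.2.2.2 := by
        constructor
        · simp only [pvLtB, Bool.or_eq_true, Bool.and_eq_true, decide_eq_true_eq]; omega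
        · omega
      simp only [pvQ, Bool.not_eq_true', List.any_eq_false] at hqv
      have := hqv u hut
      simp only [Bool.and_eq_false_iff, Bool.not_eq_true, decide_eq_false_iff_not] at this
      rcases this with h | h
      · rw [hdom.1] at h; cases h
      · exact h hdom.2
    refine List.Pairwise.map (·.2) ?_ hpw2
    intro a b h
    exact h
  -- sorted2 on z with pairwise-distinct starts is plain sort by start
  have hzne : z.Pairwise (fun a b => a.2.2.1 ≠ b.2.2.1) := by
    have hsym : ∀ {a b : pvKP}, a.2.2.1 ≠ b.2.2.1 → b.2.2.1 ≠ a.2.2.1 := fun h he => h he.symm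
    exact (hperm.pairwise_iff @hsym).1 (hKlt.imp (by intro a b h; omega))
  have hs2 : PySem.List.sorted2 z (fun kp => kp.2.2.1) (fun kp => -kp.2.2.2)
      = PySem.List.sorted z (fun kp => kp.2.2.1) false := by
    have hagree : ∀ (a b : pvKP), a.2.2.1 ≠ b.2.2.1 →
        (decide (a.2.2.1 < b.2.2.1) || !decide (b.2.2.1 < a.2.2.1) && decide (-a.2.2.2 < -b.2.2.2))
          = decide (a.2.2.1 < b.2.2.1) := by
      intro a b h
      rcases lt_or_gt_of_ne h with hlt | hgt
      · simp [hlt]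
      · have h1 : decide (a.2.2.1 < b.2.2.1) = false := by simp; omega
        have h2 : decide (b.2.2.1 < a.2.2.1) = true := by simp; omega
        simp [h1, h2]
    show z.foldl (fun acc x => PySem.List.insertBy _ x acc) [] = _
    rw [PySem.List.sorted_eq_foldl_insertBy]
    refine pv_foldl_insert_congr _ _ z [] ?_ ?_
    · intro x _ y hy; cases hy
    · refine hzne.imp ?_
      intro a b h
      exact hagree b a (fun he => h he.symm)
  rw [hs2]
  exact (PySem.List.sorted_eq_of_perm_of_pairwise_lt z K (fun kp => kp.2.2.1) hperm hKlt).symm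

-- ===== VERDICT =====
theorem largest_keyphrases_spec : Claim_equal_largest_keyphrases := by
  intro keyphrases _
  unfold Spec_largest_keyphrases
  exact pv_ab_eq keyphrases
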